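-- pv_equiv track=rewrite | github.com/GagoilKim/Programmers_Algorithm | Midterm.py | solution
-- ===== SOURCE A (Python) =====
-- def solution(answers):
--     answer = []
--     one = [1, 2, 3, 4, 5]
--     oCount = 0
--     two = [2, 1, 2, 3, 2, 4, 2, 5]
--     tCount = 0
--     thr = [3, 3, 1, 1, 2, 2, 4, 4, 5, 5]
--     thCount = 0
--     while len(answers) > 0:
--         cur = answers[0]
--         o = one.pop(0)
--         one.append(o)
--         if o == cur:
--             oCount += 1
--         t = two.pop(0)
--         two.append(t)
--         if t == cur:
--             tCount += 1
--         tc = thr.pop(0)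
--         thr.append(tc)
--         if tc == cur:
--             thCount += 1
--
--         answers.pop(0)
--
--     m = max(oCount, tCount, thCount)
--     if m == oCount:
--         answer.append(1)
--     if m == tCount:
--         answer.append(2)
--     if m == thCount:
--         answer.append(3)
--
--     return answer
-- ===== SOURCE B (Python) =====
-- def solution(answers):
--     one = [1, 2, 3, 4, 5]
--     two = [2, 1, 2, 3, 2, 4, 2, 5]
--     thr = [3, 3, 1, 1, 2, 2, 4, 4, 5, 5]
--     c1 = c2 = c3 = 0
--     for i, cur in enumerate(answers):
--         if one[i % 5] == cur:
--             c1 += 1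
--         if two[i % 8] == cur:
--             c2 += 1
--         if thr[i % 10] == cur:
--             c3 += 1
--     m = max(c1, c2, c3)
--     return [n for n, c in ((1, c1), (2, c2), (3, c3)) if c == m]
-- ===== Notes on version B (the rewrite author's own statement) =====
-- stated objective: faster
-- what changed: Replaces the while-loop that rotates the three pattern lists with pop(0)/append (pop(0) is O(len) each step, and answers is consumed with pop(0) too) by a single indexed pass reading each fixed pattern via i % len, no mutation.
import Mathlib
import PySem

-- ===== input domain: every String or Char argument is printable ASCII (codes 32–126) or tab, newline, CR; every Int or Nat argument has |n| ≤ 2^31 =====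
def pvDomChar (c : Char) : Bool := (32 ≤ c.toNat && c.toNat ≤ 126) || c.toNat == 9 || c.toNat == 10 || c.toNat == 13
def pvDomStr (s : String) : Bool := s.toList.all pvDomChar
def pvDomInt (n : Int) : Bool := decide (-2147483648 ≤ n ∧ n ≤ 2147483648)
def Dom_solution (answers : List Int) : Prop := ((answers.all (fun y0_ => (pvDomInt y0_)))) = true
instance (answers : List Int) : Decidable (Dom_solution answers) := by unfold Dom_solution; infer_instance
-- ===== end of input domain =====

-- B replaces A's quadratic rotate-the-pattern-lists-with-pop(0) while-loop by one indexed
-- pass using i % len into the fixed patterns (objective: faster, asymptotic).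
-- A empties its argument list in place (answers.pop(0)); B does not mutate it — the
-- equivalence proved here is about the RETURN value only.

-- ===== PORT A =====
-- A's while-loop: recursion on answers; 'x = l.pop(0); l.append(x)' on the always-nonempty
-- pattern lists is l.headI / l.tail ++ [l.headI] (exact since the lists stay nonempty).
def solLoopA : List Int → List Int → List Int → List Int → Int × Int × Int → Int × Int × Int
  | [], _, _, _, c => c
  | cur :: rest, one, two, thr, (oC, tC, thC) =>
    let o := one.headI
    let one' := one.tail ++ [o]
    let oC' := if o == cur then oC + 1 else oC
    let t := two.headI
    let two' := two.tail ++ [t]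
    let tC' := if t == cur then tC + 1 else tC
    let tc := thr.headI
    let thr' := thr.tail ++ [tc]
    let thC' := if tc == cur then thC + 1 else thC
    solLoopA rest one' two' thr' (oC', tC', thC')

def solution (answers : List Int) : List Int :=
  let (oC, tC, thC) := solLoopA answers [1, 2, 3, 4, 5] [2, 1, 2, 3, 2, 4, 2, 5]
      [3, 3, 1, 1, 2, 2, 4, 4, 5, 5] (0, 0, 0)
  let m := max (max oC tC) thC   -- max(oCount, tCount, thCount)
  let answer : List Int := []
  let answer := if m == oC then answer ++ [1] else answer
  let answer := if m == tC then answer ++ [2] else answer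
  let answer := if m == thC then answer ++ [3] else answer
  answer

-- ===== PORT B =====
-- Source B's 'for i, cur in enumerate(answers)': recursion carrying the running index i.
-- one[i % 5] etc.: List.getD is exact here since 0 ≤ i % 5 < 5 (in-range Python indexing).
def solLoopB : List Int → Nat → Int × Int × Int → Int × Int × Int
  | [], _, c => c
  | cur :: rest, i, (c1, c2, c3) =>
    let c1' := if ([1, 2, 3, 4, 5] : List Int).getD (i % 5) 0 == cur then c1 + 1 else c1
    let c2' := if ([2, 1, 2, 3, 2, 4, 2, 5] : List Int).getD (i % 8) 0 == cur then c2 + 1 else c2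
    let c3' := if ([3, 3, 1, 1, 2, 2, 4, 4, 5, 5] : List Int).getD (i % 10) 0 == cur then c3 + 1 else c3
    solLoopB rest (i + 1) (c1', c2', c3')

def solution_alt (answers : List Int) : List Int :=
  let (c1, c2, c3) := solLoopB answers 0 (0, 0, 0)
  let m := max (max c1 c2) c3
  (([(1, c1), (2, c2), (3, c3)] : List (Int × Int)).filter (fun p => p.2 == m)).map (·.1)

-- ===== PRECONDITION & SPEC =====
def Spec_solution (answers : List Int) (out : List Int) : Prop := out = solution_alt answers
instance (answers : List Int) (out : List Int) : Decidable (Spec_solution answers out) := by unfold Spec_solution; infer_instance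

-- ===== CLAIM (what is proved, stated in full; the proofs are below) =====
def Claim_equal_solution : Prop := ∀ (answers : List Int), Dom_solution answers → Spec_solution answers (solution answers)

-- ===== LEMMAS AND PROOFS =====

def rotL (l : List Int) (k : Nat) : List Int := l.drop k ++ l.take k

lemma loops_agree (answers : List Int) :
    ∀ (i : Nat) (c : Int × Int × Int),
      solLoopA answers (rotL [1, 2, 3, 4, 5] (i % 5))
        (rotL [2, 1, 2, 3, 2, 4, 2, 5] (i % 8))
        (rotL [3, 3, 1, 1, 2, 2, 4, 4, 5, 5] (i % 10)) c = solLoopB answers i c := by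
  induction answers with
  | nil => intro i c; rfl
  | cons cur rest ih =>
    intro i c
    obtain ⟨c1, c2, c3⟩ := c
    have h5 : (i + 1) % 5 = (i % 5 + 1) % 5 := by omega
    have h8 : (i + 1) % 8 = (i % 8 + 1) % 8 := by omega
    have h10 : (i + 1) % 10 = (i % 10 + 1) % 10 := by omega
    have e5 : (rotL [1, 2, 3, 4, 5] (i % 5)).headI = ([1, 2, 3, 4, 5] : List Int).getD (i % 5) 0 ∧
        (rotL [1, 2, 3, 4, 5] (i % 5)).tail ++ [(rotL [1, 2, 3, 4, 5] (i % 5)).headI]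
          = rotL [1, 2, 3, 4, 5] ((i + 1) % 5) := by
      rw [h5]
      have : i % 5 < 5 := by omega
      interval_cases h : (i % 5) <;> exact ⟨rfl, rfl⟩
    have e8 : (rotL [2, 1, 2, 3, 2, 4, 2, 5] (i % 8)).headI = ([2, 1, 2, 3, 2, 4, 2, 5] : List Int).getD (i % 8) 0 ∧
        (rotL [2, 1, 2, 3, 2, 4, 2, 5] (i % 8)).tail ++ [(rotL [2, 1, 2, 3, 2, 4, 2, 5] (i % 8)).headI]
          = rotL [2, 1, 2, 3, 2, 4, 2, 5] ((i + 1) % 8) := by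
      rw [h8]
      have : i % 8 < 8 := by omega
      interval_cases h : (i % 8) <;> exact ⟨rfl, rfl⟩
    have e10 : (rotL [3, 3, 1, 1, 2, 2, 4, 4, 5, 5] (i % 10)).headI = ([3, 3, 1, 1, 2, 2, 4, 4, 5, 5] : List Int).getD (i % 10) 0 ∧
        (rotL [3, 3, 1, 1, 2, 2, 4, 4, 5, 5] (i % 10)).tail ++ [(rotL [3, 3, 1, 1, 2, 2, 4, 4, 5, 5] (i % 10)).headI]
          = rotL [3, 3, 1, 1, 2, 2, 4, 4, 5, 5] ((i + 1) % 10) := by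
      rw [h10]
      have : i % 10 < 10 := by omega
      interval_cases h : (i % 10) <;> exact ⟨rfl, rfl⟩
    show solLoopA (cur :: rest) _ _ _ _ = solLoopB (cur :: rest) i _
    rw [solLoopA, solLoopB]
    rw [e5.2, e8.2, e10.2, e5.1, e8.1, e10.1]
    exact ih (i + 1) _

theorem beqc (a b : Int) : (a == b) = (b == a) := by
  by_cases h : a = b
  · simp [h]
  · simp [h, Ne.symm h]

lemma assemble_agree (m c1 c2 c3 : Int) (hm : m = c1 ∨ m = c2 ∨ m = c3) :
    (let answer : List Int := []
     let answer := if m == c1 then answer ++ [1] else answer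
     let answer := if m == c2 then answer ++ [2] else answer
     let answer := if m == c3 then answer ++ [3] else answer
     answer) =
    ((([(1, c1), (2, c2), (3, c3)] : List (Int × Int)).filter (fun p => p.2 == m)).map (·.1)) := by
  simp only [List.filter, beqc _ m]
  by_cases h1 : m = c1 <;> by_cases h2 : m = c2 <;> by_cases h3 : m = c3 <;>
    simp_all [beq_iff_eq] <;> repeat (split <;> simp_all)

-- ===== VERDICT (by name: the statement is the Claim_ definition above) =====
theorem solution_spec : Claim_equal_solution := by
  intro answers _
  unfold Spec_solution solution solution_alt
  have h := loops_agree answers 0 (0, 0, 0)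
  simp only [rotL] at h
  norm_num at h
  rw [h]
  obtain ⟨c1, c2, c3⟩ := solLoopB answers 0 (0, 0, 0)
  exact assemble_agree _ c1 c2 c3 (by omega)
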